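-- pv_equiv track=rewrite | github.com/ASKabalan/jax-fli-result | app/views/_7_Analysis/spherical_analysis.py | _staircase_coords
-- ===== SOURCE A (Python) =====
-- def _staircase_coords(n_selected: int) -> tuple[list[tuple[int, int]], int, int]:
--     """Return (coords, nrows, ncols) for a lower-triangular staircase layout."""
--     coords: list[tuple[int, int]] = []
--     r = 0
--     while len(coords) < n_selected:
--         for c in range(r + 1):
--             if len(coords) < n_selected:
--                 coords.append((r, c))
--         r += 1
--     nrows = coords[-1][0] + 1 if coords else 1
--     return coords, nrows, nrows  # ncols == nrows for staircase
-- ===== SOURCE B (Python) =====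
-- def _isqrt(n: int) -> int:
--     """Integer floor square root by binary search (no float, exact for all n >= 0)."""
--     lo, hi = 0, n + 1
--     while hi - lo > 1:
--         mid = (lo + hi) // 2
--         if mid * mid <= n:
--             lo = mid
--         else:
--             hi = mid
--     return lo
--
--
-- def _coord(i: int) -> tuple[int, int]:
--     """Invert the triangular numbering: flat index i -> (row, col)."""
--     r = (_isqrt(8 * i + 1) - 1) // 2
--     return (r, i - r * (r + 1) // 2)
--
--
-- def _staircase_coords(n_selected: int) -> tuple[list[tuple[int, int]], int, int]:
--     """Return (coords, nrows, ncols) for a lower-triangular staircase layout."""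
--     if n_selected <= 0:
--         return [], 1, 1
--     coords = [_coord(i) for i in range(n_selected)]
--     nrows = (_isqrt(8 * (n_selected - 1) + 1) - 1) // 2 + 1
--     return coords, nrows, nrows  # ncols == nrows for staircase
-- ===== Notes on version B (the rewrite author's own statement) =====
-- stated objective: alternative
-- what changed: B computes each coordinate directly from its flat index by closed-form triangular-number inversion (row = (isqrt(8i+1)-1)//2, col = i - row*(row+1)//2, with an integer binary-search isqrt), instead of growing the list row by row inside nested loops guarded by the current length.
import Mathlib
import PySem

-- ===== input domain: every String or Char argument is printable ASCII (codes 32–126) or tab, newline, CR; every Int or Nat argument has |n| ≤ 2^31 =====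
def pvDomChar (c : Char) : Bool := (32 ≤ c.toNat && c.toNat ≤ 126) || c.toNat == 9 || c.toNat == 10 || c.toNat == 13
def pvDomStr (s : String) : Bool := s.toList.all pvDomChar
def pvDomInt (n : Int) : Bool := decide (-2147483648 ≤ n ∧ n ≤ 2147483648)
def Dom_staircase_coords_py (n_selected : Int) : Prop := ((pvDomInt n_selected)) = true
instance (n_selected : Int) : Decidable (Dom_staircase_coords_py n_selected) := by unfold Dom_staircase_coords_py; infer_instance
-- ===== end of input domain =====

-- B inverts the triangular numbering in closed form per flat index (integer binary-search
-- isqrt), instead of A's row-by-row growth guarded by the current list length.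

-- ===== PORT A =====
-- inner 'for c in range(r+1): if len(coords) < n_selected: coords.append((r, c))'
def pvRowA (n : Int) (coords : List (Int × Int)) (r : Int) : List (Int × Int) :=
  (PySem.List.pyRange 0 (r + 1) 1).foldl
    (fun acc c => if (acc.length : Int) < n then acc ++ [(r, c)] else acc) coords

-- the 'while len(coords) < n_selected' loop; fuel only makes the loop total
-- (n.toNat + 1 steps always suffice: each iteration appends at least one element)
def pvLoopA (n : Int) : Nat → List (Int × Int) → Int → List (Int × Int)
  | 0, coords, _ => coords
  | fuel + 1, coords, r =>
      if (coords.length : Int) < n then pvLoopA n fuel (pvRowA n coords r) (r + 1) else coords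

def staircase_coords_py (n_selected : Int) : (List (Int × Int)) × Int × Int :=
  let coords := pvLoopA n_selected (n_selected.toNat + 1) [] 0
  -- 'coords[-1][0] + 1 if coords else 1'
  let nrows : Int := if coords = [] then 1 else (PySem.List.pyGetD coords (-1) (0, 0)).1 + 1
  (coords, nrows, nrows)

-- ===== PORT B =====
-- 'while hi - lo > 1: mid = (lo+hi)//2; …'; fuel only makes the loop total
def pvIsqrtLoop (n : Int) : Nat → Int → Int → Int
  | 0, lo, _ => lo
  | fuel + 1, lo, hi =>
      if hi - lo > 1 then
        let mid := PySem.Int.floordiv (lo + hi) 2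
        if mid * mid ≤ n then pvIsqrtLoop n fuel mid hi else pvIsqrtLoop n fuel lo mid
      else lo

-- '_isqrt': binary search for the floor square root
def pvIsqrt (n : Int) : Int := pvIsqrtLoop n (n.toNat + 2) 0 (n + 1)

-- '_coord(i)'
def pvCoord (i : Int) : Int × Int :=
  let r := PySem.Int.floordiv (pvIsqrt (8 * i + 1) - 1) 2
  (r, i - PySem.Int.floordiv (r * (r + 1)) 2)

def staircase_coords_py_alt (n_selected : Int) : (List (Int × Int)) × Int × Int :=
  if n_selected ≤ 0 then ([], 1, 1)
  else
    let coords := (PySem.List.pyRange 0 n_selected 1).map pvCoord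
    let nrows := PySem.Int.floordiv (pvIsqrt (8 * (n_selected - 1) + 1) - 1) 2 + 1
    (coords, nrows, nrows)

-- ===== PRECONDITION & SPEC =====
def Spec_staircase_coords_py (n_selected : Int) (out : (List (Int × Int)) × Int × Int) : Prop := out = staircase_coords_py_alt n_selected
instance (n_selected : Int) (out : (List (Int × Int)) × Int × Int) : Decidable (Spec_staircase_coords_py n_selected out) := by unfold Spec_staircase_coords_py; infer_instance

-- ===== CLAIM (what is proved, stated in full; the proofs are below) =====
def Claim_equal_staircase_coords_py : Prop := ∀ (n_selected : Int), Dom_staircase_coords_py n_selected → Spec_staircase_coords_py n_selected (staircase_coords_py n_selected)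

-- ===== LEMMAS AND PROOFS =====

-- proof-side model of the triangle
def pvRow (k : Nat) : List (Int × Int) := (List.range (k + 1)).map (fun c => ((k : Int), Int.ofNat c))

def pvTriangle (k : Nat) : List (Int × Int) := (List.range k).flatMap pvRow

def pvTri (k : Nat) : Nat := (pvTriangle k).length

theorem pvRow_length (k : Nat) : (pvRow k).length = k + 1 := by simp [pvRow]

theorem pvTriangle_succ (k : Nat) : pvTriangle (k + 1) = pvTriangle k ++ pvRow k := by
  simp [pvTriangle, List.range_succ]

theorem pvTri_succ (k : Nat) : pvTri (k + 1) = pvTri k + (k + 1) := by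
  simp [pvTri, pvTriangle_succ, pvRow_length]

theorem pvTri_two (k : Nat) : 2 * pvTri k = k * (k + 1) := by
  induction k with
  | zero => rfl
  | succ k ih =>
      rw [pvTri_succ]
      have h : (k + 1) * (k + 1 + 1) = k * (k + 1) + 2 * (k + 1) := by ring
      rw [h, ← ih]; ring

theorem pvTri_mono {a b : Nat} (h : a ≤ b) : pvTri a ≤ pvTri b := by
  induction b with
  | zero => simp [Nat.le_zero.mp h]
  | succ b ih =>
      rcases Nat.lt_or_ge a (b + 1) with hl | hg
      · exact le_trans (ih (by omega)) (by rw [pvTri_succ]; omega)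
      · have : a = b + 1 := by omega
        simp [this]

theorem pvRow_pyRange (k : Nat) :
    (PySem.List.pyRange 0 ((k : Int) + 1) 1).map (fun c => ((k : Int), c)) = pvRow k := by
  have h : ((k : Int) + 1) = ((k + 1 : Nat) : Int) := by push_cast; ring
  rw [h, PySem.List.pyRange_one, List.map_map]
  have h2 : ((((k + 1 : Nat) : Int)) - 0).toNat = k + 1 := by omega
  rw [h2, pvRow]
  apply List.map_congr_left
  intro a _
  simp [Int.ofNat_eq_natCast]

theorem pvGfold (n : Int) (rr : Int) :
    ∀ (L : List Int) (coords : List (Int × Int)),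
      L.foldl (fun acc c => if (acc.length : Int) < n then acc ++ [(rr, c)] else acc) coords
        = coords ++ (L.map (fun c => (rr, c))).take (n.toNat - coords.length) := by
  intro L
  induction L with
  | nil => intro coords; simp
  | cons c L ih =>
      intro coords
      by_cases h : (coords.length : Int) < n
      · have h1 : 1 ≤ n.toNat - coords.length := by omega
        simp only [List.foldl_cons, if_pos h, ih]
        have ht : n.toNat - coords.length = (n.toNat - (coords ++ [(rr, c)]).length) + 1 := by
          simp; omega
        rw [ht]
        simp [List.take_succ_cons]
      · have h0 : n.toNat - coords.length = 0 := by omega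
        simp only [List.foldl_cons, if_neg h, ih, h0]
        simp

theorem pvRowA_eq (n : Int) (k : Nat) (coords : List (Int × Int)) :
    pvRowA n coords (k : Int) = coords ++ (pvRow k).take (n.toNat - coords.length) := by
  rw [pvRowA, pvGfold, pvRow_pyRange]

theorem pvLoopA_stop (n : Int) (f : Nat) (coords : List (Int × Int)) (r : Int)
    (h : ¬ (coords.length : Int) < n) : pvLoopA n f coords r = coords := by
  cases f with
  | zero => rfl
  | succ f => simp [pvLoopA, if_neg h]

-- invariant induction for A's while loop
theorem pvMain (n : Int) :
    ∀ (m : Nat) (k fa : Nat),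
      (pvTri k : Int) < n → n.toNat - pvTri k ≤ m → m ≤ fa →
      ∃ R : Nat, k ≤ R
        ∧ pvLoopA n fa (pvTriangle k) (k : Int) = (pvTriangle (R + 1)).take n.toNat
        ∧ (pvTri R : Int) < n ∧ n ≤ (pvTri (R + 1) : Int) := by
  intro m
  induction m with
  | zero =>
      intro k fa hlt hm _
      exfalso; omega
  | succ m ih =>
      intro k fa hlt hm hfa
      obtain ⟨fa', rfl⟩ : ∃ fa', fa = fa' + 1 := ⟨fa - 1, by omega⟩
      have hlen : ((pvTriangle k).length : Int) < n := hlt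
      by_cases hstop : n ≤ (pvTri (k + 1) : Int)
      · refine ⟨k, le_refl _, ?_, hlt, hstop⟩
        simp only [pvLoopA, if_pos hlen]
        rw [pvRowA_eq]
        have hcover : (pvTriangle k).length = pvTri k := rfl
        have hfull : (pvTriangle k ++ (pvRow k).take (n.toNat - (pvTriangle k).length)).length = n.toNat := by
          simp [pvRow_length, hcover]
          have := pvTri_succ k; omega
        rw [pvLoopA_stop n fa' _ _ (by rw [hfull]; omega)]
        rw [pvTriangle_succ]
        have hn : n.toNat = (pvTriangle k).length + (n.toNat - pvTri k) := by
          rw [hcover]; omega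
        rw [hn, List.take_append]
        congr 1
        exact (List.take_of_length_le (by omega)).symm
      · rw [not_le] at hstop
        have hstep := ih (k + 1) fa' hstop (by have := pvTri_succ k; omega) (by omega)
        obtain ⟨R, hk, hA, h1, h2⟩ := hstep
        refine ⟨R, by omega, ?_, h1, h2⟩
        simp only [pvLoopA, if_pos hlen]
        rw [pvRowA_eq]
        have hcover : (pvTriangle k).length = pvTri k := rfl
        have hfull : (pvRow k).take (n.toNat - (pvTriangle k).length) = pvRow k := by
          apply List.take_of_length_le
          rw [pvRow_length, hcover]
          have := pvTri_succ k; omega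
        rw [hfull, ← pvTriangle_succ]
        have e3 : (k : Int) + 1 = ((k + 1 : Nat) : Int) := by push_cast; ring
        rw [e3]; exact hA

-- last element of a truncated triangle
theorem pvLast (R : Nat) (t : Nat) (h1 : pvTri R < t) (h2 : t ≤ pvTri (R + 1)) :
    ((pvTriangle (R + 1)).take t).getLast? = some ((R : Int), Int.ofNat (t - pvTri R - 1)) := by
  have hd2 : t - pvTri R ≤ R + 1 := by have := pvTri_succ R; omega
  have hlen : (pvTriangle R).length = pvTri R := rfl
  rw [pvTriangle_succ]
  have ht : t = (pvTriangle R).length + (t - pvTri R) := by omega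
  rw [ht, List.take_append, List.take_of_length_le (by omega)]
  have harg : (pvTriangle R).length + (t - pvTri R) - (pvTriangle R).length = t - pvTri R := by
    omega
  rw [harg]
  have hrow : (pvRow R).take (t - pvTri R)
      = ((List.range (t - pvTri R - 1)).map (fun c => ((R : Int), Int.ofNat c)))
        ++ [((R : Int), Int.ofNat (t - pvTri R - 1))] := by
    rw [pvRow, ← List.map_take, List.take_range]
    have hmin : min (t - pvTri R) (R + 1) = t - pvTri R := by omega
    rw [hmin]
    have hsucc : t - pvTri R = (t - pvTri R - 1) + 1 := by omega
    rw [hsucc, List.range_succ, List.map_append]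
    simp
  rw [hrow, ← List.append_assoc]
  simp only [List.getLast?_concat, Option.some.injEq, Prod.mk.injEq, true_and]
  congr 1
  rw [hlen]
  omega

-- ---------- B side ----------

-- the binary search maintains lo² ≤ n < hi²; it returns the floor square root
theorem pvIsqrtLoop_spec (n : Int) :
    ∀ (f : Nat) (lo hi : Int), 0 ≤ lo → lo < hi → lo * lo ≤ n → n < hi * hi →
      (hi - lo).toNat ≤ f + 1 →
      0 ≤ pvIsqrtLoop n f lo hi ∧ pvIsqrtLoop n f lo hi * pvIsqrtLoop n f lo hi ≤ n
        ∧ n < (pvIsqrtLoop n f lo hi + 1) * (pvIsqrtLoop n f lo hi + 1) := by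
  intro f
  induction f with
  | zero =>
      intro lo hi h0 hlh hlo hhi hf
      have : hi = lo + 1 := by omega
      subst this
      simpa [pvIsqrtLoop] using ⟨h0, hlo, hhi⟩
  | succ f ih =>
      intro lo hi h0 hlh hlo hhi hf
      by_cases hgap : hi - lo > 1
      · have hstep : pvIsqrtLoop n (f + 1) lo hi
            = if PySem.Int.floordiv (lo + hi) 2 * PySem.Int.floordiv (lo + hi) 2 ≤ n
              then pvIsqrtLoop n f (PySem.Int.floordiv (lo + hi) 2) hi
              else pvIsqrtLoop n f lo (PySem.Int.floordiv (lo + hi) 2) := by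
          simp only [pvIsqrtLoop, if_pos hgap]
        have hfd : PySem.Int.floordiv (lo + hi) 2 = (lo + hi) / 2 :=
          PySem.Int.floordiv_eq_ediv_of_pos (by norm_num)
        have hb1 : lo < PySem.Int.floordiv (lo + hi) 2 := by rw [hfd]; omega
        have hb2 : PySem.Int.floordiv (lo + hi) 2 < hi := by rw [hfd]; omega
        by_cases hc : PySem.Int.floordiv (lo + hi) 2 * PySem.Int.floordiv (lo + hi) 2 ≤ n
        · rw [hstep, if_pos hc]
          exact ih _ hi (by omega) hb2 hc hhi (by omega)
        · rw [hstep, if_neg hc]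
          exact ih lo _ h0 hb1 hlo (by omega) (by omega)
      · have : hi = lo + 1 := by omega
        subst this
        simpa [pvIsqrtLoop, if_neg hgap] using ⟨h0, hlo, hhi⟩

theorem pvIsqrt_spec (n : Int) (hn : 0 ≤ n) :
    0 ≤ pvIsqrt n ∧ pvIsqrt n * pvIsqrt n ≤ n ∧ n < (pvIsqrt n + 1) * (pvIsqrt n + 1) := by
  have := pvIsqrtLoop_spec n (n.toNat + 2) 0 (n + 1) (le_refl 0) (by omega) (by simpa)
    (by nlinarith) (by omega)
  simpa [pvIsqrt] using this

-- closed-form coordinate: for a Nat index i it is (r, i - tri r) with tri r ≤ i < tri (r+1)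
theorem pvCoord_nat (i : Nat) :
    ∃ r : Nat, pvCoord (i : Int) = ((r : Int), Int.ofNat (i - pvTri r))
      ∧ pvTri r ≤ i ∧ i < pvTri (r + 1) := by
  obtain ⟨hs0, hs1, hs2⟩ := pvIsqrt_spec (8 * (i : Int) + 1) (by omega)
  unfold pvCoord
  generalize hsdef : pvIsqrt (8 * (i : Int) + 1) = s at hs0 hs1 hs2 ⊢
  have hs_pos : 1 ≤ s := by nlinarith
  have hfd : PySem.Int.floordiv (s - 1) 2 = (s - 1) / 2 :=
    PySem.Int.floordiv_eq_ediv_of_pos (by norm_num)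
  rw [hfd]
  generalize hrdef : (s - 1) / 2 = rv
  have hr0 : 0 ≤ rv := by omega
  have hrb1 : 2 * rv + 1 ≤ s := by omega
  have hrb2 : s ≤ 2 * rv + 2 := by omega
  have hlow : rv * (rv + 1) ≤ 2 * (i : Int) := by nlinarith
  have hhigh : 2 * (i : Int) < (rv + 1) * (rv + 2) := by nlinarith
  have hrn : rv = (rv.toNat : Int) := by omega
  have htri2 : (2 * (pvTri rv.toNat : Int)) = rv * (rv + 1) := by
    rw [hrn]; exact_mod_cast pvTri_two rv.toNat
  have htri2' : (2 * (pvTri (rv.toNat + 1) : Int)) = (rv + 1) * (rv + 2) := by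
    have h : (2 * (pvTri (rv.toNat + 1) : Int))
        = ((rv.toNat : Int) + 1) * ((rv.toNat : Int) + 2) := by
      exact_mod_cast pvTri_two (rv.toNat + 1)
    rw [h, ← hrn]
  refine ⟨rv.toNat, ?_, by omega, by omega⟩
  show (rv, (i : Int) - PySem.Int.floordiv (rv * (rv + 1)) 2)
      = ((rv.toNat : Int), Int.ofNat (i - pvTri rv.toNat))
  have htri : PySem.Int.floordiv (rv * (rv + 1)) 2 = (pvTri rv.toNat : Int) := by
    rw [PySem.Int.floordiv_eq_ediv_of_pos (by norm_num)]; omega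
  have hsnd : Int.ofNat (i - pvTri rv.toNat) = (i : Int) - (pvTri rv.toNat : Int) := by
    simp only [Int.ofNat_eq_natCast]; omega
  rw [htri, ← hrn, hsnd]

-- the bracket tri r ≤ i < tri (r+1) determines r
theorem pvBracket_unique {r r' i : Nat}
    (h1 : pvTri r ≤ i) (h2 : i < pvTri (r + 1))
    (h1' : pvTri r' ≤ i) (h2' : i < pvTri (r' + 1)) : r = r' := by
  rcases Nat.lt_trichotomy r r' with h | h | h
  · exact absurd (le_trans (pvTri_mono (by omega : r + 1 ≤ r')) h1') (by omega)
  · exact h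
  · exact absurd (le_trans (pvTri_mono (by omega : r' + 1 ≤ r)) h1) (by omega)

-- indexing the triangle at a flat index inside row r
theorem pvTriangle_getElem? (K r i : Nat) (h1 : pvTri r ≤ i) (h2 : i < pvTri (r + 1))
    (hK : r + 1 ≤ K) :
    (pvTriangle K)[i]? = some ((r : Int), Int.ofNat (i - pvTri r)) := by
  induction K with
  | zero => omega
  | succ K ih =>
      rcases Nat.lt_or_ge (r + 1) (K + 1) with hl | hg
      · rw [pvTriangle_succ, List.getElem?_append_left]
        · exact ih (by omega)
        · exact lt_of_lt_of_le h2 (pvTri_mono (by omega))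
      · have hrK : r = K := by omega
        subst hrK
        rw [pvTriangle_succ, List.getElem?_append_right (by exact h1)]
        have hlt : i - (pvTriangle r).length < r + 1 := by
          have : (pvTriangle r).length = pvTri r := rfl
          have := pvTri_succ r
          omega
        simp only [pvRow, List.getElem?_map, List.getElem?_range hlt, Option.map_some]
        have : (pvTriangle r).length = pvTri r := rfl
        rw [this]

theorem pvTriangle_length (K : Nat) : (pvTriangle K).length = pvTri K := rfl

-- ===== VERDICT (by name: the statement is the Claim_ definition above) =====
theorem staircase_coords_py_spec : Claim_equal_staircase_coords_py := by
  intro n _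
  unfold Spec_staircase_coords_py staircase_coords_py staircase_coords_py_alt
  by_cases hn : n ≤ 0
  · have hA : pvLoopA n (n.toNat + 1) [] 0 = [] :=
      pvLoopA_stop n _ [] 0 (by simp; omega)
    simp [hA, if_pos hn]
  · rw [if_neg hn]
    have h0 : (pvTri 0 : Int) < n := by
      have : pvTri 0 = 0 := rfl
      omega
    obtain ⟨R, _, hA, h1, h2⟩ :=
      pvMain n n.toNat 0 (n.toNat + 1) h0 (by omega) (by omega)
    have hA' : pvLoopA n (n.toNat + 1) [] 0 = (pvTriangle (R + 1)).take n.toNat := by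
      have e3 : pvTriangle 0 = [] := rfl
      rw [← e3]
      exact_mod_cast hA
    have hlenA : ((pvTriangle (R + 1)).take n.toNat).length = n.toNat := by
      rw [List.length_take, pvTriangle_length]
      omega
    have hne : (pvTriangle (R + 1)).take n.toNat ≠ [] := by
      intro hcon
      rw [hcon] at hlenA
      simp at hlenA
      omega
    -- coords agree elementwise
    have hcoords : (pvTriangle (R + 1)).take n.toNat
        = (PySem.List.pyRange 0 n 1).map pvCoord := by
      rw [PySem.List.pyRange_one]
      apply List.ext_getElem?
      intro i
      rcases Nat.lt_or_ge i n.toNat with hi | hi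
      · obtain ⟨r, hc, hb1, hb2⟩ := pvCoord_nat i
        have hrR : r + 1 ≤ R + 1 := by
          have : pvTri r ≤ i := hb1
          rcases Nat.lt_or_ge r (R + 1) with h | h
          · omega
          · exact absurd (le_trans (pvTri_mono h) hb1) (by omega)
        rw [List.getElem?_take_of_lt hi, pvTriangle_getElem? (R + 1) r i hb1 hb2 hrR]
        rw [List.getElem?_map, List.getElem?_map, List.getElem?_range (by omega)]
        simp only [Option.map_some, Option.some.injEq]
        rw [← hc]
        norm_num
      · rw [List.getElem?_eq_none (by omega)]
        rw [List.getElem?_eq_none (by simp; omega)]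
    -- nrows agree: both are R + 1
    have hnrowsB : PySem.Int.floordiv (pvIsqrt (8 * (n - 1) + 1) - 1) 2 + 1 = (R : Int) + 1 := by
      have hlast : n.toNat - 1 < n.toNat := by omega
      obtain ⟨r, hc, hb1, hb2⟩ := pvCoord_nat (n.toNat - 1)
      have hbR1 : pvTri R ≤ n.toNat - 1 := by omega
      have hbR2 : n.toNat - 1 < pvTri (R + 1) := by omega
      have hr : r = R := pvBracket_unique hb1 hb2 hbR1 hbR2
      have harg : (8 * ((n.toNat - 1 : Nat) : Int) + 1) = 8 * (n - 1) + 1 := by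
        omega
      have : (pvCoord ((n.toNat - 1 : Nat) : Int)).1 = (r : Int) := by rw [hc]
      rw [pvCoord] at this
      simp only [harg] at this
      rw [this, hr]
    -- A's nrows as computed from the last element
    have hlastA := pvLast R n.toNat (by omega) (by omega)
    have hget : PySem.List.pyGetD ((pvTriangle (R + 1)).take n.toNat) (-1) ((0 : Int), (0 : Int))
        = ((R : Int), Int.ofNat (n.toNat - pvTri R - 1)) := by
      rw [PySem.List.pyGetD_neg_one _ _ hne]
      have hgl := List.getLast?_eq_some_getLast (l := (pvTriangle (R + 1)).take n.toNat) hne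
      rw [hgl] at hlastA
      exact Option.some.inj hlastA
    simp only [hA']
    rw [if_neg hne, hget, hnrowsB, hcoords]
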